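-- pv_equiv track=rewrite | github.com/joshanashakya/dissertation | workspace/dataset/java-python/GeeksForGeeks/391/A/2.py | GetMinSubarrayLength
-- ===== SOURCE A (Python) =====
-- def GetMinSubarrayLength(a, n):
--
--     # Store the maximum possible
--     # GCD of the resulting subarray
--     ans = max(a[0], a[n - 1])
--
--     # Two pointers initially pointing
--     # to the first and last element
--     # respectively
--     lo = 0
--     hi = n - 1
--
--     # Moving the left pointer to the
--     # right if the elements are
--     # divisible by the maximum GCD
--     while (lo < n and a[lo] % ans == 0):
--         lo += 1
--
--     # Moving the right pointer to the
--     # left if the elements are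
--     # divisible by the maximum GCD
--     while (hi > lo and a[hi] % ans == 0):
--         hi -= 1
--
--     # Return the length of
--     # the subarray
--     return (hi - lo + 1)
-- ===== SOURCE B (Python) =====
-- def GetMinSubarrayLength(a, n):
--     # Single forward pass: grow the divisible prefix with lo, record the
--     # last non-divisible index in hi; replaces the two end-anchored scans.
--     ans = max(a[0], a[n - 1])
--     lo = 0
--     hi = n - 1
--     for i in range(n):
--         if a[i] % ans != 0:
--             hi = i
--         elif lo == i:
--             lo = i + 1
--     return hi - lo + 1
-- ===== Notes on version B (the rewrite author's own statement) =====
-- stated objective: simpler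
-- what changed: Replaces A's two mutually-dependent end-anchored while-scans (advance lo over the divisible prefix, then walk hi down from the right) by one left-to-right pass that simultaneously grows the divisible-prefix pointer lo and records the last non-divisible index in hi, returning the same hi - lo + 1.
import Mathlib
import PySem

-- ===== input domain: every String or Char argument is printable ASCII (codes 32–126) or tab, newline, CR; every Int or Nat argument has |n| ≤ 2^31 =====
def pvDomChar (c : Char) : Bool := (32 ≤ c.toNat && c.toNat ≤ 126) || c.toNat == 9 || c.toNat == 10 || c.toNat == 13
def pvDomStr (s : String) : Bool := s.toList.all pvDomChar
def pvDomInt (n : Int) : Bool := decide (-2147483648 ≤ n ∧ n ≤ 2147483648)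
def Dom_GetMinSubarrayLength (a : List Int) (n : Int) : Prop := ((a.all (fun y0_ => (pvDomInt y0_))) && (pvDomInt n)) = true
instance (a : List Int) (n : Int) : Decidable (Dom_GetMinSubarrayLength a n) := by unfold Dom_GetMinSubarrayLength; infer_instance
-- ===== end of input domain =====

-- B replaces A's two end-anchored while-scans by ONE forward pass maintaining both
-- boundary pointers (objective: simpler — one loop instead of two dependent scans).

-- ===== PORT A =====
-- `while lo < n and a[lo] % ans == 0: lo += 1`, fuel = number of remaining steps
def pvLoA (a : List Int) (n ans : Int) : Nat → Int → Int
  | 0, lo => lo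
  | Nat.succ k, lo =>
      if lo < n ∧ PySem.Int.mod (PySem.List.pyGetD a lo 0) ans = 0
      then pvLoA a n ans k (lo + 1) else lo

-- `while hi > lo and a[hi] % ans == 0: hi -= 1`
def pvHiA (a : List Int) (ans lo : Int) : Nat → Int → Int
  | 0, hi => hi
  | Nat.succ k, hi =>
      if lo < hi ∧ PySem.Int.mod (PySem.List.pyGetD a hi 0) ans = 0
      then pvHiA a ans lo k (hi - 1) else hi

def GetMinSubarrayLength (a : List Int) (n : Int) : Int :=
  let ans := max (PySem.List.pyGetD a 0 0) (PySem.List.pyGetD a (n - 1) 0)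
  let lo := pvLoA a n ans n.toNat 0
  let hi := pvHiA a ans lo (n - 1 - lo).toNat (n - 1)
  hi - lo + 1

-- ===== PORT B =====
-- one step of the single forward pass of Source B
def pvStepB (a : List Int) (ans : Int) (st : Int × Int) (i : Int) : Int × Int :=
  if PySem.Int.mod (PySem.List.pyGetD a i 0) ans ≠ 0 then (st.1, i)
  else if st.1 = i then (i + 1, st.2) else st

def GetMinSubarrayLength_alt (a : List Int) (n : Int) : Int :=
  let ans := max (PySem.List.pyGetD a 0 0) (PySem.List.pyGetD a (n - 1) 0)
  let st := (PySem.List.pyRange 0 n 1).foldl (pvStepB a ans) (0, n - 1)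
  st.2 - st.1 + 1

-- ===== PRECONDITION & SPEC =====
-- Pre_ is exactly where Python A returns normally: a non-empty, the index n-1 in
-- Python range (so 1-len ≤ n ≤ len), and — only when the loops run, i.e. n ≥ 1 —
-- max(a[0], a[n-1]) ≠ 0 (else `% ans` raises ZeroDivisionError).
def Pre_GetMinSubarrayLength (a : List Int) (n : Int) : Prop :=
  a ≠ [] ∧ 1 - (a.length : Int) ≤ n ∧ n ≤ (a.length : Int) ∧
    (1 ≤ n → max (PySem.List.pyGetD a 0 0) (PySem.List.pyGetD a (n - 1) 0) ≠ 0)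
instance (a : List Int) (n : Int) : Decidable (Pre_GetMinSubarrayLength a n) := by
  unfold Pre_GetMinSubarrayLength; infer_instance

def pvWitness_GetMinSubarrayLength : List Int × Int := ([4, 6, 3, 8], 4)

def Spec_GetMinSubarrayLength (a : List Int) (n : Int) (out : Int) : Prop := out = GetMinSubarrayLength_alt a n
instance (a : List Int) (n : Int) (out : Int) : Decidable (Spec_GetMinSubarrayLength a n out) := by unfold Spec_GetMinSubarrayLength; infer_instance

-- ===== CLAIM (what is proved, stated in full; the proofs are below) =====
def Claim_equal_GetMinSubarrayLength : Prop := ∀ (a : List Int) (n : Int), Dom_GetMinSubarrayLength a n → Pre_GetMinSubarrayLength a n → Spec_GetMinSubarrayLength a n (GetMinSubarrayLength a n)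

-- ===== LEMMAS AND PROOFS =====

-- index i of `a` is NOT divisible by ans (the branch condition both passes test)
def pvQ (a : List Int) (ans : Int) (i : Nat) : Bool :=
  decide (PySem.Int.mod (a.getD i 0) ans ≠ 0)

lemma loA_char (a : List Int) (ans : Int) :
    ∀ (k lo m : Nat), lo + k = m →
      pvLoA a (m : Int) ans k (lo : Int)
        = ((((List.range' lo k).filter (pvQ a ans)).headD m : Nat) : Int) := by
  intro k
  induction k with
  | zero => intro lo m h; simp [pvLoA]; omega
  | succ k ih =>
    intro lo m h
    rw [List.range'_succ]
    simp only [pvLoA, List.filter_cons]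
    by_cases hq : pvQ a ans lo
    · have : ¬ (PySem.Int.mod (PySem.List.pyGetD a (lo:Int) 0) ans = 0) := by
        simpa [pvQ] using hq
      rw [if_neg (by push Not; intro _; exact this)]
      simp [hq]
    · have hmod : PySem.Int.mod (PySem.List.pyGetD a (lo:Int) 0) ans = 0 := by
        simpa [pvQ] using hq
      rw [if_pos ⟨by exact_mod_cast Nat.lt_of_lt_of_le (Nat.lt_succ_self _) (by omega), hmod⟩]
      have := ih (lo+1) m (by omega)
      simpa [hq] using this

lemma hiA_char (a : List Int) (ans : Int) :
    ∀ (k lo : Nat),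
      pvHiA a ans (lo : Int) k (((lo + k : Nat) : Int))
        = ((((List.range' (lo + 1) k).filter (pvQ a ans)).getLastD lo : Nat) : Int) := by
  intro k
  induction k with
  | zero => intro lo; simp [pvHiA]
  | succ k ih =>
    intro lo
    rw [List.range'_1_concat]
    simp only [pvHiA, List.filter_append, List.filter_cons, List.filter_nil]
    have key : PySem.List.pyGetD a (((lo + (k+1) : Nat)) : Int) 0 = a.getD (lo + 1 + k) 0 := by
      have h2 : ((lo + (k+1) : Nat) : Int) = ((lo + 1 + k : Nat) : Int) := by push_cast; ring
      rw [h2, PySem.List.pyGetD_natCast]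
    by_cases hq : pvQ a ans (lo + 1 + k)
    · have hne : ¬ (PySem.Int.mod (PySem.List.pyGetD a (((lo + (k+1) : Nat)) : Int) 0) ans = 0) := by
        rw [key]; simpa [pvQ] using hq
      rw [if_neg (by intro hc; exact hne hc.2)]
      simp only [hq, if_pos, List.getLastD_concat]
      exact congrArg Nat.cast (by omega : lo + (k+1) = lo+1+k)
    · have hmod : PySem.Int.mod (PySem.List.pyGetD a (((lo + (k+1) : Nat)) : Int) 0) ans = 0 := by
        rw [key]; simpa [pvQ] using hq
      rw [if_pos ⟨by exact_mod_cast (by omega : (lo:Int) < ((lo + (k+1) : Nat) : Int)), hmod⟩]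
      have hcast : ((lo + (k+1) : Nat) : Int) - 1 = ((lo + k : Nat) : Int) := by push_cast; ring
      rw [hcast, ih lo]
      simp [hq]

lemma foldB_char (a : List Int) (ans d : Int) :
    ∀ (m : Nat),
      (PySem.List.pyRange 0 (m : Int) 1).foldl (pvStepB a ans) (0, d)
        = (((((List.range m).filter (pvQ a ans)).headD m : Nat) : Int),
           ((((List.range m).filter (pvQ a ans)).getLast?).map (fun x : Nat => (x : Int))).getD d) := by
  intro m
  induction m with
  | zero => simp
  | succ m ih =>
    have hsplit : PySem.List.pyRange 0 ((m+1 : Nat) : Int) 1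
        = PySem.List.pyRange 0 (m : Nat) 1 ++ [(m : Int)] := by
      have := PySem.List.pyRange_one_succ_right (a := 0) (b := (m : Int)) (by exact_mod_cast Nat.zero_le m)
      push_cast
      exact this
    rw [hsplit, List.foldl_append, ih, List.range_succ, List.filter_append, List.filter_cons, List.filter_nil]
    simp only [List.foldl_cons, List.foldl_nil]
    have key : PySem.List.pyGetD a ((m : Nat) : Int) 0 = a.getD m 0 := PySem.List.pyGetD_natCast a m 0
    by_cases hq : pvQ a ans m
    · -- non-divisible index m: st.2 := m, st.1 kept
      have hcond : PySem.Int.mod (PySem.List.pyGetD a ((m:Nat) : Int) 0) ans ≠ 0 := by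
        rw [key]; simpa [pvQ] using hq
      simp only [pvStepB]
      rw [if_pos hcond]
      simp only [Prod.mk.injEq]
      constructor
      · -- first components
        rcases h : (List.range m).filter (pvQ a ans) with _ | ⟨f, R⟩
        · simp [hq]
        · simp [hq]
      · simp [hq]
    · have hcond : ¬ PySem.Int.mod (PySem.List.pyGetD a ((m:Nat) : Int) 0) ans ≠ 0 := by
        rw [key]; simpa [pvQ] using hq
      simp only [pvStepB]
      rw [if_neg hcond]
      simp only [hq, Bool.false_eq_true, if_false, List.append_nil]
      rcases h : (List.range m).filter (pvQ a ans) with _ | ⟨f, R⟩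
      · simp
      · have hf : f < m := by
          have : f ∈ (List.range m).filter (pvQ a ans) := by rw [h]; exact List.mem_cons_self ..
          exact List.mem_range.mp (List.mem_of_mem_filter this)
        have hne : ((f :: R).headD m : Nat) ≠ (m : Nat) := by simp; omega
        simp only [List.headD_cons]
        rw [if_neg (by exact_mod_cast fun hc => hne (by simpa [List.headD_cons] using hc))]

lemma ports_eq (a : List Int) (n : Int) :
    GetMinSubarrayLength a n = GetMinSubarrayLength_alt a n := by
  set ans := max (PySem.List.pyGetD a 0 0) (PySem.List.pyGetD a (n - 1) 0) with hans
  show pvHiA a ans (pvLoA a n ans n.toNat 0) (n - 1 - pvLoA a n ans n.toNat 0).toNat (n - 1)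
        - pvLoA a n ans n.toNat 0 + 1
      = ((PySem.List.pyRange 0 n 1).foldl (pvStepB a ans) (0, n - 1)).2
        - ((PySem.List.pyRange 0 n 1).foldl (pvStepB a ans) (0, n - 1)).1 + 1
  by_cases hn : 1 ≤ n
  · set m := n.toNat with hmdef
    have hmn : (m : Int) = n := Int.toNat_of_nonneg (by omega)
    rw [← hmn]
    have hlo := loA_char a ans m 0 m (by omega)
    simp only [Nat.cast_zero] at hlo
    rw [← List.range_eq_range'] at hlo
    rw [hlo]
    have hfold := foldB_char a ans ((m : Int) - 1) m
    rw [hfold]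
    rcases hFe : (List.range m).filter (pvQ a ans) with _ | ⟨f, R0⟩
    · simp only [List.headD_nil, List.getLast?_nil, Option.map_none, Option.getD_none]
      have hfuel : ((m : Int) - 1 - ((m : Nat) : Int)).toNat = 0 := by omega
      rw [hfuel]
      simp [pvHiA]
    · have hfF : f ∈ (List.range m).filter (pvQ a ans) := by
        rw [hFe]; exact List.mem_cons_self ..
      have hfm : f < m := List.mem_range.mp (List.mem_of_mem_filter hfF)
      have hqf : pvQ a ans f = true := List.of_mem_filter hfF
      -- minimality of f
      have hpw : ((List.range m).filter (pvQ a ans)).Pairwise (· < ·) :=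
        (List.pairwise_lt_range).sublist List.filter_sublist
      have hmin : ∀ i ∈ (List.range m).filter (pvQ a ans), f ≤ i := by
        intro i hi
        rw [hFe] at hi hpw
        rcases List.mem_cons.mp hi with h | h
        · omega
        · exact le_of_lt ((List.pairwise_cons.mp hpw).1 i h)
      have hbelow : ∀ i, i < f → pvQ a ans i = false := by
        intro i hif
        by_contra hc
        have : pvQ a ans i = true := by simpa using hc
        have : i ∈ (List.range m).filter (pvQ a ans) :=
          List.mem_filter.mpr ⟨List.mem_range.mpr (by omega), this⟩
        exact absurd (hmin i this) (by omega)
      -- decompose F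
      have hdec : (List.range m).filter (pvQ a ans)
          = f :: (List.range' (f + 1) (m - 1 - f)).filter (pvQ a ans) := by
        have hr : List.range m = List.range (f + 1) ++ List.range' (f + 1) (m - 1 - f) := by
          rw [List.range_eq_range', List.range_eq_range']
          rw [show List.range' 0 (f+1) ++ List.range' (f+1) (m-1-f)
                = List.range' 0 (f+1) ++ List.range' (0 + (f+1)) (m-1-f) by norm_num]
          rw [List.range'_append_1]
          congr 1; omega
        rw [hr, List.filter_append, List.range_succ, List.filter_append]
        have h1 : (List.range f).filter (pvQ a ans) = [] :=
          List.filter_eq_nil_iff.mpr (fun i hi _ => by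
            simp [hbelow i (List.mem_range.mp hi)] at *)
        rw [h1]
        simp [hqf]
      rw [hFe] at hdec
      have hR : R0 = (List.range' (f + 1) (m - 1 - f)).filter (pvQ a ans) := by
        injection hdec
      simp only [List.headD_cons]
      have hfuel : ((m : Int) - 1 - ((f : Nat) : Int)).toNat = m - 1 - f := by omega
      have hhi : pvHiA a ans (f : Int) (m - 1 - f) ((m : Int) - 1) = ((R0.getLastD f : Nat) : Int) := by
        have h1 : ((f + (m - 1 - f) : Nat) : Int) = (m : Int) - 1 := by omega
        have h2 := hiA_char a ans (m - 1 - f) f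
        rw [h1] at h2
        rw [h2, ← hR]
      rw [hfuel, hhi]
      cases hg : (f :: R0).getLast? with
      | none => simp at hg
      | some x =>
        have hx : x = R0.getLastD f := by
          have hgd : (f :: R0).getLastD f = ((f :: R0).getLast?).getD f := List.getLastD_eq_getLast?
          rw [List.getLastD_cons, hg] at hgd
          simpa using hgd.symm
        simp [hx]
  · have hm0 : n.toNat = 0 := by omega
    rw [hm0]
    have hr0 : PySem.List.pyRange 0 n 1 = [] := PySem.List.pyRange_one_eq_nil (by omega)
    rw [hr0]
    have hfuel : (n - 1 - pvLoA a n ans 0 0).toNat = 0 := by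
      simp only [pvLoA]; omega
    rw [hfuel]
    simp [pvLoA, pvHiA]

-- ===== VERDICT (by name: the statement is the Claim_ definition above) =====
theorem GetMinSubarrayLength_spec : Claim_equal_GetMinSubarrayLength := by
  intro a n _ _
  show GetMinSubarrayLength a n = GetMinSubarrayLength_alt a n
  exact ports_eq a n
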